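-- pv_equiv track=rewrite | github.com/lbhsos/AlgoStudy | 2step_python/string_processing/sort_filename.py | find_num_point
-- ===== SOURCE A (Python) =====
-- def find_num_point(file):
--     n = len(file)
--     num_point, tail_point = -1, -1
--     for i in range(n):
--         if file[i].isdigit() and num_point == -1:
--             num_point = i
--         elif file[i].isalpha() and num_point != -1:
--             tail_point = i - 1
--         if num_point != -1 and tail_point != -1:
--             break
--
--     # if tail doesn't exist
--     if tail_point == -1:
--         tail_point = n
--     return num_point, tail_point
-- ===== SOURCE B (Python) =====
-- def find_num_point(file):
--     # Single backward pass: walk the string right-to-left maintaining fa, the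
--     # index of the first alpha char in the suffix already seen (n if none).
--     # On meeting a digit, that digit is (so far) the first digit, and its tail
--     # is fa - 1 (or n if no alpha follows).  The leftmost digit wins last.
--     n = len(file)
--     num, tail, fa = -1, n, n
--     for i in range(n - 1, -1, -1):
--         c = file[i]
--         if c.isdigit():
--             num = i
--             tail = fa - 1 if fa != n else n
--         elif c.isalpha():
--             fa = i
--     return num, tail
-- ===== Notes on version B (the rewrite author's own statement) =====
-- stated objective: alternative
-- what changed: Replaces A's forward scan with break/elif flag bookkeeping by a single right-to-left pass that maintains the first-alpha index of the suffix and rebuilds (num, tail) back-to-front, with no early exit and no -1 tail sentinel.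
import Mathlib
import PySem

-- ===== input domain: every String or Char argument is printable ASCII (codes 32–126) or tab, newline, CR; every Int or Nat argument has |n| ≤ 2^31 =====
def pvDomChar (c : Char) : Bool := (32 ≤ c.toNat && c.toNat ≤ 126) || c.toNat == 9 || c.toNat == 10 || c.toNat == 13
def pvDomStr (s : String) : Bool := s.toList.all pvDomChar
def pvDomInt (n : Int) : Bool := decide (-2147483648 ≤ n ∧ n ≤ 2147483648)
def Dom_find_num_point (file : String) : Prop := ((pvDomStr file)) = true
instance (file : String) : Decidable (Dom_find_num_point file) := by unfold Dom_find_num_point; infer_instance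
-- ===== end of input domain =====

-- B replaces A's forward scan (break/elif flag bookkeeping) by one right-to-left pass that
-- maintains the first-alpha index of the suffix and rebuilds the answer back-to-front; objective: alternative.


-- ===== PORT A =====
-- A's for-loop with early break, as structural recursion over the chars with the running
-- index i and the state (num_point, tail_point).
def find_num_point_loop : List Char → Int → Int → Int → Int × Int
  | [], _, num, tail => (num, tail)
  | c :: cs, i, num, tail =>
    let num' := if PySem.Chars.isdigit c && num == -1 then i else num
    let tail' := if !(PySem.Chars.isdigit c && num == -1) && (PySem.Chars.isalpha c && num != -1) then i - 1 else tail
    if num' != -1 && tail' != -1 then (num', tail')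
    else find_num_point_loop cs (i + 1) num' tail'

def find_num_point (file : String) : Int × Int :=
  let n : Int := PySem.Str.len file
  let (num_point, tail_point) := find_num_point_loop file.toList 0 (-1) (-1)
  (num_point, if tail_point == -1 then n else tail_point)

-- ===== PORT B =====
-- Source B's backward for-loop over range(n-1,-1,-1) = a right fold over the indexed chars:
-- state (num, tail, fa), fa = first alpha index seen in the suffix (n if none).
def find_num_point_alt (file : String) : Int × Int :=
  let n : Int := PySem.Str.len file
  let st := (PySem.List.enumerate file.toList 0).foldr
    (fun (p : Int × Char) (st : Int × Int × Int) =>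
      let (num, tail, fa) := st
      if PySem.Chars.isdigit p.2 then (p.1, if fa != n then fa - 1 else n, fa)
      else if PySem.Chars.isalpha p.2 then (num, tail, p.1)
      else (num, tail, fa))
    (-1, n, n)
  (st.1, st.2.1)

-- ===== PRECONDITION & SPEC =====
def Spec_find_num_point (file : String) (out : Int × Int) : Prop := out = find_num_point_alt file
instance (file : String) (out : Int × Int) : Decidable (Spec_find_num_point file out) := by unfold Spec_find_num_point; infer_instance

-- ===== CLAIM (what is proved, stated in full; the proofs are below) =====
def Claim_equal_find_num_point : Prop := ∀ (file : String), Dom_find_num_point file → Spec_find_num_point file (find_num_point file)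

-- ===== LEMMAS AND PROOFS =====

-- proof-side spec helpers: forward scans characterising both programs
def scanNum : List Char → Int → Option Int
  | [], _ => none
  | c :: cs, i => if PySem.Chars.isdigit c then some i else scanNum cs (i + 1)

-- first alpha index at/after j, default d
def scanFa : List Char → Int → Int → Int
  | [], _, d => d
  | c :: cs, j, d => if PySem.Chars.isalpha c then j else scanFa cs (j + 1) d

-- first alpha index minus one, default d (shape of A's tail after the fix-up)
def scanTail : List Char → Int → Int → Int
  | [], _, d => d
  | c :: cs, j, d => if PySem.Chars.isalpha c then j - 1 else scanTail cs (j + 1) d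

theorem num_lb (cs : List Char) (i k : Int)
    (h : scanNum cs i = some k) : i ≤ k := by
  induction cs generalizing i with
  | nil => simp [scanNum] at h
  | cons c cs ih =>
    simp only [scanNum] at h
    split at h
    · simp at h; omega
    · have := ih (i + 1) h; omega

-- Phase 2 of A: once num ≥ 0 is fixed and tail = -1, the loop finds the first alpha and stops.
theorem loop_phase2 (cs : List Char) (i num : Int) (hnum : 0 ≤ num) (hi : 1 ≤ i) :
    find_num_point_loop cs i num (-1) = (num, scanTail cs i (-1)) := by
  induction cs generalizing i with
  | nil => simp [find_num_point_loop, scanTail]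
  | cons c cs ih =>
    have hne : (num == -1) = false := by simp; omega
    have hne' : (num != -1) = true := by simp [bne]; omega
    have hi1 : ((i - 1 : Int) != -1) = true := by simp [bne]; omega
    by_cases ha : PySem.Chars.isalpha c <;> by_cases hd : PySem.Chars.isdigit c <;>
      simp only [find_num_point_loop, scanTail, ha, hd, hne, hne', hi1,
        Bool.and_false, Bool.false_and, Bool.true_and, Bool.and_true, Bool.not_false,
        Bool.not_true, Bool.and_self, if_true, if_false, Bool.false_eq_true, Bool.true_eq_false,
        Bool.and_true] <;>
      first
        | rfl
        | exact ih (i + 1) (by omega)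

-- Phase 1 of A: with no digit seen yet, the loop searches for the first digit, then enters phase 2.
theorem loop_phase1 (cs : List Char) (i : Int) (hi : 0 ≤ i) :
    find_num_point_loop cs i (-1) (-1) =
      match scanNum cs i with
      | none => (-1, -1)
      | some k => (k, scanTail (cs.drop (k + 1 - i).toNat) (k + 1) (-1)) := by
  induction cs generalizing i with
  | nil => simp [find_num_point_loop, scanNum]
  | cons c cs ih =>
    by_cases hd : PySem.Chars.isdigit c
    · simp only [find_num_point_loop, scanNum, hd, Bool.true_and,
        beq_self_eq_true, if_true, Bool.not_true, Bool.false_and, if_false,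
        Bool.false_eq_true, bne_self_eq_false, Bool.and_false]
      rw [loop_phase2 cs (i + 1) i hi (by omega)]
      have h1 : (i + 1 - i).toNat = 1 := by omega
      simp [h1]
    · simp only [find_num_point_loop, scanNum, hd, Bool.false_and, if_false,
        Bool.false_eq_true, bne_self_eq_false, Bool.and_false, Bool.not_false, Bool.true_and]
      rw [ih (i + 1) (by omega)]
      cases h : scanNum cs (i + 1) with
      | none => simp
      | some k =>
        have hk := num_lb cs (i + 1) k h
        have h2 : (k + 1 - i).toNat = (k + 1 - (i + 1)).toNat + 1 := by omega
        simp [h2]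

-- replacing the default -1 by n in the tail scan commutes with A's final fix-up,
-- provided every produced tail index j - 1 is ≥ 0 (j ≥ 1).
theorem tail_default (cs : List Char) (j n : Int) (hj : 1 ≤ j) :
    (if scanTail cs j (-1) == -1 then n else scanTail cs j (-1)) = scanTail cs j n := by
  induction cs generalizing j with
  | nil => simp [scanTail]
  | cons c cs ih =>
    simp only [scanTail]
    by_cases ha : PySem.Chars.isalpha c
    · simp only [ha, if_true]
      rw [if_neg (by simp; omega)]
    · simp only [ha, if_false, Bool.false_eq_true]
      exact ih (j + 1) (by omega)

theorem num_nonneg (cs : List Char) (i k : Int) (hi : 0 ≤ i)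
    (h : scanNum cs i = some k) : 0 ≤ k :=
  le_trans hi (num_lb cs i k h)

theorem digit_not_alpha (c : Char) (hd : PySem.Chars.isdigit c = true) :
    PySem.Chars.isalpha c = false := by
  simp only [PySem.Chars.isdigit, PySem.Chars.isalpha, PySem.Chars.isupper, PySem.Chars.islower,
    Bool.and_eq_true, Bool.or_eq_false_iff, Bool.and_eq_false_iff, decide_eq_true_eq,
    decide_eq_false_iff_not] at hd ⊢
  simp only [Char.le_def, UInt32.le_iff_toNat_le] at hd ⊢
  have h0 : ('0' : Char).val.toNat = 48 := rfl
  have h9 : ('9' : Char).val.toNat = 57 := rfl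
  have hA : ('A' : Char).val.toNat = 65 := rfl
  have hZ : ('Z' : Char).val.toNat = 90 := rfl
  have ha : ('a' : Char).val.toNat = 97 := rfl
  have hz : ('z' : Char).val.toNat = 122 := rfl
  rw [h0, h9] at hd
  rw [hA, hZ, ha, hz]
  omega

-- scanTail with default n is 'scanFa minus one, unless absent', whenever in-range indices stay < n
theorem tail_of_fa (cs : List Char) (j n : Int) (h : j + cs.length ≤ n) :
    scanTail cs j n = if (scanFa cs j n != n) = true then scanFa cs j n - 1 else n := by
  induction cs generalizing j with
  | nil => simp [scanTail, scanFa]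
  | cons c cs ih =>
    simp only [scanTail, scanFa, List.length_cons] at *
    by_cases ha : PySem.Chars.isalpha c
    · have hj : j < n := by push_cast at h; omega
      simp [ha, bne]; omega
    · simp only [ha, if_false, Bool.false_eq_true]
      exact ih (j + 1) (by push_cast; push_cast at h; omega)

-- the forward-scan value of B's tail component
def tailF : List Char → Int → Int → Int
  | [], _, n => n
  | c :: cs, i, n =>
    if PySem.Chars.isdigit c then (if (scanFa cs (i + 1) n != n) = true then scanFa cs (i + 1) n - 1 else n)
    else tailF cs (i + 1) n

-- B's backward fold computes exactly the three forward scans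
theorem foldr_char (cs : List Char) (i n : Int) :
    (PySem.List.enumerate cs i).foldr
      (fun (p : Int × Char) (st : Int × Int × Int) =>
        let (num, tail, fa) := st
        if PySem.Chars.isdigit p.2 then (p.1, if fa != n then fa - 1 else n, fa)
        else if PySem.Chars.isalpha p.2 then (num, tail, p.1)
        else (num, tail, fa))
      (-1, n, n)
    = ((scanNum cs i).getD (-1), tailF cs i n, scanFa cs i n) := by
  induction cs generalizing i with
  | nil => simp [PySem.List.enumerate_nil, scanNum, tailF, scanFa]
  | cons c cs ih =>
    rw [PySem.List.enumerate_cons, List.foldr_cons, ih (i + 1)]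
    by_cases hd : PySem.Chars.isdigit c
    · have ha := digit_not_alpha c hd
      simp [hd, ha, scanNum, tailF, scanFa]
    · by_cases ha : PySem.Chars.isalpha c <;> simp [hd, ha, scanNum, tailF, scanFa]

-- tailF agrees with A's tail (scanTail with default n after the drop at the first digit)
theorem tailF_eq (cs : List Char) (i n : Int) (hi : 0 ≤ i) (h : i + cs.length ≤ n) :
    tailF cs i n =
      match scanNum cs i with
      | none => n
      | some k => scanTail (cs.drop (k + 1 - i).toNat) (k + 1) n := by
  induction cs generalizing i with
  | nil => simp [tailF, scanNum]
  | cons c cs ih =>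
    simp only [List.length_cons] at h
    by_cases hd : PySem.Chars.isdigit c
    · simp only [tailF, scanNum, hd, if_true]
      have h1 : (i + 1 - i).toNat = 1 := by omega
      simp only [h1, List.drop_succ_cons, List.drop_zero]
      rw [tail_of_fa cs (i + 1) n (by push_cast; push_cast at h; omega)]
    · simp only [tailF, scanNum, hd, if_false, Bool.false_eq_true]
      rw [ih (i + 1) (by omega) (by push_cast; push_cast at h; omega)]
      cases hs : scanNum cs (i + 1) with
      | none => simp
      | some k =>
        have hk := num_lb cs (i + 1) k hs
        have h2 : (k + 1 - i).toNat = (k + 1 - (i + 1)).toNat + 1 := by omega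
        simp [h2]

-- ===== VERDICT (by name: the statement is the Claim_ definition above) =====
theorem find_num_point_spec : Claim_equal_find_num_point := by
  intro file _
  unfold Spec_find_num_point find_num_point find_num_point_alt
  simp only
  rw [foldr_char, loop_phase1 file.toList 0 le_rfl,
      tailF_eq file.toList 0 (PySem.Str.len file) le_rfl
        (by simp [PySem.Str.len]; try omega)]
  cases h : scanNum file.toList 0 with
  | none => simp
  | some k =>
    have hk := num_nonneg file.toList 0 k le_rfl h
    simp only [Int.sub_zero, Option.getD_some]
    rw [← tail_default (file.toList.drop (k + 1).toNat) (k + 1) (PySem.Str.len file) (by omega)]
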